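-- pv_equiv track=rewrite | github.com/SamuelSchlesinger/MaxCut-approx-derandomization | python/maxcut.py | conditional_expectations_maxcut
-- ===== SOURCE A (Python) =====
-- from typing import List, Optional, Tuple
--
-- Edge = Tuple[int, int]  # (u, v), 0-indexed, undirected
--
-- def cut_size(n: int, edges: List[Edge], assignment: List[int]) -> int:
--     """Number of edges with endpoints on opposite sides. assignment[v] in {0, 1}."""
--     return sum(1 for u, v in edges if assignment[u] != assignment[v])
--
-- def conditional_expectations_maxcut(
--     n: int, edges: List[Edge]
-- ) -> Tuple[List[int], int]:
--     """
--     Deterministic MaxCut via the Method of Conditional Expectations.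
--
--     Define e(r_1,...,r_i) = conditional expected cut size given the first i
--     vertex assignments.  By Vadhan eq. 3.2:
--
--         e(r_1,...,r_i) = |cut(S_i, T_i)|
--                        + (1/2) * |{edges with >= 1 endpoint in U_i}|
--
--     where S_i, T_i are placed vertices and U_i = {i+1,...,n-1} is undecided.
--
--     The greedy decision for vertex i+1 compares e(..., 0) vs e(..., 1).
--     The difference simplifies to:
--
--         e(..., r_{i+1}=0) - e(..., r_{i+1}=1)
--             = |cut({i+1}, T_i)| - |cut({i+1}, S_i)|
--             = (# placed neighbors in T) - (# placed neighbors in S)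
--
--     So: place vertex i in T (side 1) iff it has >= as many placed neighbors in S
--     as in T (tie-breaks to T).  Equivalently: place each vertex on the OPPOSITE
--     side from its majority of already-placed neighbors.
--
--     Guarantees: cut >= |E|/2.
--
--     Returns:
--         (assignment, cut_size)
--     """
--     assignment: List[int] = [-1] * n  # -1 = unassigned sentinel
--     adj: List[List[int]] = [[] for _ in range(n)]
--     for u, v in edges:
--         adj[u].append(v)
--         adj[v].append(u)
--
--     for i in range(n):
--         neighbors_in_S = sum(1 for j in adj[i] if assignment[j] == 0)
--         neighbors_in_T = sum(1 for j in adj[i] if assignment[j] == 1)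
--         # Place in T (1) iff cut({i}, S_i) >= cut({i}, T_i), i.e. S-neighbors >= T-neighbors
--         assignment[i] = 1 if neighbors_in_S >= neighbors_in_T else 0
--
--     return assignment, cut_size(n, edges, assignment)
-- ===== SOURCE B (Python) =====
-- def conditional_expectations_maxcut(n, edges):
--     # Push-style greedy: score[i] = (# decided neighbors on side 0) - (# on side 1),
--     # maintained incrementally: each vertex, once decided, pushes a +1/-1 contribution
--     # to all of its neighbors, so every decision is a single score lookup.
--     adj = [[] for _ in range(n)]
--     for u, v in edges:
--         adj[u].append(v)
--         adj[v].append(u)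
--     score = [0] * n
--     assignment = [0] * n
--     for i in range(n):
--         s = 1 if score[i] >= 0 else 0
--         assignment[i] = s
--         delta = 1 - 2 * s
--         for j in adj[i]:
--             score[j] += delta
--     cut = sum(1 for u, v in edges if assignment[u] != assignment[v])
--     return assignment, cut
-- ===== Notes on version B (the rewrite author's own statement) =====
-- stated objective: faster
-- what changed: Replaces A's pull-style greedy (for each vertex, rescanning its whole adjacency list against the assignment array twice to count placed S- and T-neighbors) with a push-style greedy that maintains a running score array: each vertex, once decided, pushes a +1/-1 contribution to its neighbors, so every decision is a single score lookup and each adjacency entry is touched once in the loop instead of twice per generator pass.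
import Mathlib
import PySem

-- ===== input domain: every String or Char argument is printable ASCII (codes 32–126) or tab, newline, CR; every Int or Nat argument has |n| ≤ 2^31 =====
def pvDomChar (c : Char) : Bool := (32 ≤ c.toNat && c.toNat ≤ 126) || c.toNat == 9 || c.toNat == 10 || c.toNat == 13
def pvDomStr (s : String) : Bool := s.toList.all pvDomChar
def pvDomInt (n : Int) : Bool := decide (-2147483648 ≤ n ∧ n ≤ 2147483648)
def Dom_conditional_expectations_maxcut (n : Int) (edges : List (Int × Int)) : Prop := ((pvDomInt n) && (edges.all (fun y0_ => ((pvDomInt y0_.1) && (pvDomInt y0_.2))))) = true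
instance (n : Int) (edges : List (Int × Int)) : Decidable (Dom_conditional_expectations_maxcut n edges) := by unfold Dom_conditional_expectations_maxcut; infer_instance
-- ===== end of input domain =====

-- B replaces A's pull-style greedy (rescanning adjacency + assignment per vertex) by a
-- push-style greedy: each decided vertex pushes a +1/-1 contribution into a running
-- score array, so each decision is a single score lookup (objective: faster, by a
-- constant factor measured).
-- Equality of return values is proved on Pre_ (exactly where A returns, no IndexError).

-- ===== PORT A =====
-- cut_size: sum(1 for u,v in edges if assignment[u] != assignment[v]); exact under Pre_
-- (pyGetD is Python's assignment[u] for in-range u, including negative indices;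
--  out of range Python raises IndexError, excluded by Pre_).
def pvCutSize (edges : List (Int × Int)) (assignment : List Int) : Int :=
  edges.foldl (fun acc e =>
    if PySem.List.pyGetD assignment e.1 0 ≠ PySem.List.pyGetD assignment e.2 0 then acc + 1 else acc) 0

def conditional_expectations_maxcut (n : Int) (edges : List (Int × Int)) : List Int × Int :=
  -- assignment = [-1] * n ; adj = [[] for _ in range(n)]
  let assignment : List Int := List.replicate n.toNat (-1)
  let adj : List (List Int) := List.replicate n.toNat []
  -- for u, v in edges: adj[u].append(v); adj[v].append(u)
  let adj : List (List Int) := edges.foldl (fun adj e =>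
    let adj := PySem.List.pySetD adj e.1 (PySem.List.pyGetD adj e.1 [] ++ [e.2])
    PySem.List.pySetD adj e.2 (PySem.List.pyGetD adj e.2 [] ++ [e.1])) adj
  -- for i in range(n): count placed S/T neighbours, assign 1 iff nS >= nT
  let assignment : List Int := (PySem.List.pyRange 0 n 1).foldl (fun asn i =>
    let nbrs := PySem.List.pyGetD adj i []
    let nS : Int := nbrs.foldl (fun c j => if PySem.List.pyGetD asn j 9 = 0 then c + 1 else c) 0
    let nT : Int := nbrs.foldl (fun c j => if PySem.List.pyGetD asn j 9 = 1 then c + 1 else c) 0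
    PySem.List.pySetD asn i (if nS ≥ nT then 1 else 0)) assignment
  (assignment, pvCutSize edges assignment)

-- ===== PORT B =====
def conditional_expectations_maxcut_alt (n : Int) (edges : List (Int × Int)) : List Int × Int :=
  -- adj = [[] for _ in range(n)]; for u, v in edges: adj[u].append(v); adj[v].append(u)
  let adj : List (List Int) := List.replicate n.toNat []
  let adj : List (List Int) := edges.foldl (fun adj e =>
    let adj := PySem.List.pySetD adj e.1 (PySem.List.pyGetD adj e.1 [] ++ [e.2])
    PySem.List.pySetD adj e.2 (PySem.List.pyGetD adj e.2 [] ++ [e.1])) adj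
  -- score = [0] * n ; assignment = [0] * n
  -- for i in range(n): decide from score[i], then push ±1 to every neighbour
  let st : List Int × List Int := (PySem.List.pyRange 0 n 1).foldl
    (fun (st : List Int × List Int) i =>
      let s : Int := if 0 ≤ PySem.List.pyGetD st.2 i 9 then 1 else 0
      let asn := PySem.List.pySetD st.1 i s
      let delta := 1 - 2 * s
      let sc := (PySem.List.pyGetD adj i []).foldl
        (fun sc j => PySem.List.pySetD sc j (PySem.List.pyGetD sc j 9 + delta)) st.2
      (asn, sc)) (List.replicate n.toNat 0, List.replicate n.toNat 0)
  -- cut = sum(1 for u,v in edges if assignment[u] != assignment[v])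
  (st.1, edges.foldl (fun acc e =>
    if PySem.List.pyGetD st.1 e.1 0 ≠ PySem.List.pyGetD st.1 e.2 0 then acc + 1 else acc) 0)

-- ===== PRECONDITION & SPEC =====
-- Pre_ admits exactly the vertex labels Python accepts as list indices, -n <= u,v < n;
-- outside it Python A raises IndexError, so those inputs are excluded.
def Pre_conditional_expectations_maxcut (n : Int) (edges : List (Int × Int)) : Prop :=
  ∀ e ∈ edges, -n ≤ e.1 ∧ e.1 < n ∧ -n ≤ e.2 ∧ e.2 < n
instance (n : Int) (edges : List (Int × Int)) : Decidable (Pre_conditional_expectations_maxcut n edges) := by unfold Pre_conditional_expectations_maxcut; infer_instance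

def pvWitness_conditional_expectations_maxcut : Int × (List (Int × Int)) := (3, [(0, 1), (1, 2), (0, 2)])

def Spec_conditional_expectations_maxcut (n : Int) (edges : List (Int × Int)) (out : List Int × Int) : Prop := out = conditional_expectations_maxcut_alt n edges
instance (n : Int) (edges : List (Int × Int)) (out : List Int × Int) : Decidable (Spec_conditional_expectations_maxcut n edges out) := by unfold Spec_conditional_expectations_maxcut; infer_instance

-- ===== CLAIM (what is proved, stated in full; the proofs are below) =====
def Claim_equal_conditional_expectations_maxcut : Prop := ∀ (n : Int) (edges : List (Int × Int)), Dom_conditional_expectations_maxcut n edges → Pre_conditional_expectations_maxcut n edges → Spec_conditional_expectations_maxcut n edges (conditional_expectations_maxcut n edges)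

-- ===== LEMMAS AND PROOFS =====

def pvD (a : Int) : Int := if a = 0 then 1 else if a = 1 then -1 else 0

-- Python index semantics: a negative label -k denotes N - k.
def pvNorm (N : Nat) (j : Int) : Int := if j < 0 then j + N else j

theorem pvNorm_bounds (N : Nat) (j : Int) (h0 : -(N : Int) ≤ j) (h1 : j < (N : Int)) :
    0 ≤ pvNorm N j ∧ pvNorm N j < (N : Int) := by unfold pvNorm; split <;> omega

theorem pvIdx_wrap (N : Nat) (i : Int) (h0 : -(N : Int) ≤ i) (h1 : i < (N : Int)) :
    PySem.List.pyIdx? N i = some (pvNorm N i).toNat := by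
  simp only [PySem.List.pyIdx?, pvNorm]
  split_ifs <;> first | omega | (congr 1; omega) | (congr 1)

theorem pvGetD_wrap {α : Type} (xs : List α) (i : Int) (d : α)
    (h0 : -(xs.length : Int) ≤ i) (h1 : i < (xs.length : Int)) :
    PySem.List.pyGetD xs i d = xs.getD (pvNorm xs.length i).toNat d := by
  simp [PySem.List.pyGetD, PySem.List.pyGet?, pvIdx_wrap xs.length i h0 h1,
    List.getD_eq_getElem?_getD]

theorem pvSetD_wrap {α : Type} (xs : List α) (i : Int) (v : α)
    (h0 : -(xs.length : Int) ≤ i) (h1 : i < (xs.length : Int)) :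
    PySem.List.pySetD xs i v = xs.set (pvNorm xs.length i).toNat v := by
  simp [PySem.List.pySetD, PySem.List.pySet?, pvIdx_wrap xs.length i h0 h1]

theorem appAt_getD (st : List (List Int)) (i : Int) (x : Int)
    (h0 : -(st.length : Int) ≤ i) (h1 : i < (st.length : Int)) (m : Nat) (hm : m < st.length) :
    (PySem.List.pySetD st i (PySem.List.pyGetD st i [] ++ [x])).getD m [] =
      st.getD m [] ++ (if pvNorm st.length i = (m : Int) then [x] else []) := by
  have hb := pvNorm_bounds st.length i h0 h1
  rw [pvSetD_wrap st i _ h0 h1, pvGetD_wrap st i _ h0 h1]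
  rcases eq_or_ne (pvNorm st.length i).toNat m with heq | hne
  · rw [List.getD_eq_getElem _ _ (by simpa using hm), heq, List.getElem_set_self,
      List.getD_eq_getElem _ _ hm, if_pos (by omega)]
  · rw [List.getD_eq_getElem _ _ (by simpa using hm), List.getElem_set_ne hne,
      List.getD_eq_getElem _ _ hm]
    have : ¬ pvNorm st.length i = (m : Int) := by omega
    simp [this]

theorem appAt_length (st : List (List Int)) (i : Int) (x : Int) :
    (PySem.List.pySetD st i (PySem.List.pyGetD st i [] ++ [x])).length = st.length := by
  simp [PySem.List.length_pySetD]

-- Pushing delta at (possibly negative) indices js into sc: length preserved, and slot m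
-- gains delta for each j with pvNorm j = m.
theorem incr_fold (delta : Int) : ∀ (js : List Int) (sc : List Int),
    (∀ j ∈ js, -(sc.length : Int) ≤ j ∧ j < (sc.length : Int)) →
    ((js.foldl (fun sc j => PySem.List.pySetD sc j (PySem.List.pyGetD sc j 9 + delta)) sc).length = sc.length ∧
     ∀ m < sc.length,
      (js.foldl (fun sc j => PySem.List.pySetD sc j (PySem.List.pyGetD sc j 9 + delta)) sc).getD m 9 =
        sc.getD m 9 + delta * ((js.map (fun j => if pvNorm sc.length j = (m : Int) then (1 : Int) else 0)).sum))
  | [], sc, _ => ⟨rfl, fun m _ => by simp⟩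
  | j :: js, sc, h => by
    have hj := h j (by simp)
    have hb := pvNorm_bounds sc.length j hj.1 hj.2
    have hset : PySem.List.pySetD sc j (PySem.List.pyGetD sc j 9 + delta) =
        sc.set (pvNorm sc.length j).toNat (sc.getD (pvNorm sc.length j).toNat 9 + delta) := by
      rw [pvSetD_wrap sc j _ hj.1 hj.2, pvGetD_wrap sc j 9 hj.1 hj.2]
    have hlen' : (PySem.List.pySetD sc j (PySem.List.pyGetD sc j 9 + delta)).length = sc.length := by
      simp [PySem.List.length_pySetD]
    have hrec := incr_fold delta js (PySem.List.pySetD sc j (PySem.List.pyGetD sc j 9 + delta))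
      (fun x hx => by rw [hlen']; exact h x (by simp [hx]))
    rw [hlen'] at hrec
    simp only [List.foldl_cons]
    refine ⟨hrec.1, fun m hm => ?_⟩
    rw [hrec.2 m hm, hset, List.map_cons, List.sum_cons]
    rcases eq_or_ne (pvNorm sc.length j).toNat m with rfl | hne
    · rw [List.getD_eq_getElem _ _ (by simpa using hm), List.getElem_set_self,
        List.getD_eq_getElem _ _ hm, if_pos (by omega)]
      ring
    · rw [List.getD_eq_getElem _ _ (by simpa using hm), List.getElem_set_ne hne,
        ← List.getD_eq_getElem _ 9 hm, if_neg (by omega)]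
      ring

-- The greedy decision for vertex k given the decisions `prev` for vertices 0..k-1.
def pvStep (edges : List (Int × Int)) (N k : Nat) (prev : List Int) : Int :=
  if 0 ≤ (edges.map (fun e =>
      (if pvNorm N e.1 = (k : Int) ∧ 0 ≤ pvNorm N e.2 ∧ pvNorm N e.2 < (k : Int) then
        pvD (prev.getD (pvNorm N e.2).toNat 9) else 0) +
      (if pvNorm N e.2 = (k : Int) ∧ 0 ≤ pvNorm N e.1 ∧ pvNorm N e.1 < (k : Int) then
        pvD (prev.getD (pvNorm N e.1).toNat 9) else 0))).sum
  then 1 else 0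

-- The first k greedy decisions.
def pvAsnList (edges : List (Int × Int)) (N : Nat) : Nat → List Int
  | 0 => []
  | k + 1 => pvAsnList edges N k ++ [pvStep edges N k (pvAsnList edges N k)]

def pvAsn (edges : List (Int × Int)) (N k : Nat) : Int := (pvAsnList edges N (k + 1)).getD k 9

-- A's / B's adjacency list of vertex k (raw neighbour labels).
def pvAdjAt (edges : List (Int × Int)) (N k : Nat) : List Int :=
  edges.flatMap (fun e =>
    (if pvNorm N e.1 = (k : Int) then [e.2] else []) ++ (if pvNorm N e.2 = (k : Int) then [e.1] else []))

-- B's score of slot j after the first k vertices have been placed and pushed.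
def pvScore (edges : List (Int × Int)) (N k j : Nat) : Int :=
  (edges.map (fun e =>
    (if 0 ≤ pvNorm N e.1 ∧ pvNorm N e.1 < (k : Int) ∧ pvNorm N e.2 = (j : Int) then
      pvD (pvAsn edges N (pvNorm N e.1).toNat) else 0) +
    (if 0 ≤ pvNorm N e.2 ∧ pvNorm N e.2 < (k : Int) ∧ pvNorm N e.1 = (j : Int) then
      pvD (pvAsn edges N (pvNorm N e.2).toNat) else 0))).sum

theorem pvAsnList_length (edges : List (Int × Int)) (N k : Nat) : (pvAsnList edges N k).length = k := by
  induction k with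
  | zero => rfl
  | succ k ih => simp [pvAsnList, ih]

theorem pvAsnList_getD_last (edges : List (Int × Int)) (N k : Nat) (d : Int) :
    (pvAsnList edges N (k + 1)).getD k d = pvStep edges N k (pvAsnList edges N k) := by
  rw [pvAsnList, List.getD_eq_getElem _ _ (by simp [pvAsnList_length]),
    List.getElem_append_right (by simp [pvAsnList_length])]
  simp [pvAsnList_length]

theorem pvAsn_eq_step (edges : List (Int × Int)) (N k : Nat) :
    pvAsn edges N k = pvStep edges N k (pvAsnList edges N k) := pvAsnList_getD_last edges N k 9

theorem pvAsnList_getD (edges : List (Int × Int)) (N : Nat) {j k : Nat} (h : j < k) (d : Int) :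
    (pvAsnList edges N k).getD j d = pvAsn edges N j := by
  induction k with
  | zero => omega
  | succ k ih =>
    rcases Nat.lt_succ_iff_lt_or_eq.mp h with h' | rfl
    · rw [pvAsnList, List.getD_eq_getElem _ _ (by simp [pvAsnList_length]; omega),
        List.getElem_append_left (by simp [pvAsnList_length]; omega),
        ← List.getD_eq_getElem _ d (by simp [pvAsnList_length]; omega)]
      exact ih h'
    · rw [pvAsnList_getD_last, pvAsn_eq_step]

theorem pvAsn_mem (edges : List (Int × Int)) (N k : Nat) :
    pvAsn edges N k = 0 ∨ pvAsn edges N k = 1 := by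
  rw [pvAsn_eq_step, pvStep]; split <;> simp

def pvStepA (adj : List (List Int)) (e : Int × Int) : List (List Int) :=
  PySem.List.pySetD (PySem.List.pySetD adj e.1 (PySem.List.pyGetD adj e.1 [] ++ [e.2])) e.2
    (PySem.List.pyGetD (PySem.List.pySetD adj e.1 (PySem.List.pyGetD adj e.1 [] ++ [e.2])) e.2 [] ++ [e.1])

theorem adj_build (N : Nat) : ∀ (edges : List (Int × Int)) (st : List (List Int)),
    (∀ e ∈ edges, -(N : Int) ≤ e.1 ∧ e.1 < (N : Int) ∧ -(N : Int) ≤ e.2 ∧ e.2 < (N : Int)) →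
    st.length = N →
    ((edges.foldl pvStepA st).length = N ∧
     ∀ m < N, (edges.foldl pvStepA st).getD m [] = st.getD m [] ++ pvAdjAt edges N m)
  | [], st, _, hlen => ⟨hlen, fun m _ => by simp [pvAdjAt]⟩
  | e :: es, st, hPre, hlen => by
    have he := hPre e (by simp)
    have h1 : (PySem.List.pySetD st e.1 (PySem.List.pyGetD st e.1 [] ++ [e.2])).length = N := by
      rw [appAt_length, hlen]
    have h2 : (pvStepA st e).length = N := by rw [pvStepA, appAt_length, h1]
    have hrec := adj_build N es (pvStepA st e) (fun x hx => hPre x (by simp [hx])) h2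
    simp only [List.foldl_cons]
    refine ⟨hrec.1, fun m hm => ?_⟩
    rw [hrec.2 m hm, pvStepA,
        appAt_getD _ _ _ (by omega) (by omega) m (by omega),
        appAt_getD _ _ _ (by omega) (by omega) m (by omega), h1, hlen]
    simp only [pvAdjAt, List.flatMap_cons, List.append_assoc]

theorem pvAdjAt_bounds (edges : List (Int × Int)) (N k : Nat)
    (hPre : ∀ e ∈ edges, -(N : Int) ≤ e.1 ∧ e.1 < (N : Int) ∧ -(N : Int) ≤ e.2 ∧ e.2 < (N : Int)) :
    ∀ j ∈ pvAdjAt edges N k, -(N : Int) ≤ j ∧ j < (N : Int) := by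
  intro j hj
  rw [pvAdjAt] at hj
  obtain ⟨e, he, hje⟩ := List.mem_flatMap.mp hj
  have hb := hPre e he
  have : j = e.1 ∨ j = e.2 := by
    rcases List.mem_append.mp hje with h | h <;> split_ifs at h <;> simp at h <;> tauto
  rcases this with rfl | rfl <;> omega

theorem pvAsnList_succ (edges : List (Int × Int)) (N k : Nat) :
    pvAsnList edges N (k + 1) = pvAsnList edges N k ++ [pvStep edges N k (pvAsnList edges N k)] := rfl

-- Per-edge: A's decision summand for vertex k equals B's score summand at slot k.
theorem pv_edge_swap (edges : List (Int × Int)) (N k : Nat) (e : Int × Int) :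
    (if pvNorm N e.1 = (k : Int) ∧ 0 ≤ pvNorm N e.2 ∧ pvNorm N e.2 < (k : Int) then
      pvD ((pvAsnList edges N k).getD (pvNorm N e.2).toNat 9) else 0) +
    (if pvNorm N e.2 = (k : Int) ∧ 0 ≤ pvNorm N e.1 ∧ pvNorm N e.1 < (k : Int) then
      pvD ((pvAsnList edges N k).getD (pvNorm N e.1).toNat 9) else 0) =
    (if 0 ≤ pvNorm N e.1 ∧ pvNorm N e.1 < (k : Int) ∧ pvNorm N e.2 = (k : Int) then
      pvD (pvAsn edges N (pvNorm N e.1).toNat) else 0) +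
    (if 0 ≤ pvNorm N e.2 ∧ pvNorm N e.2 < (k : Int) ∧ pvNorm N e.1 = (k : Int) then
      pvD (pvAsn edges N (pvNorm N e.2).toNat) else 0) := by
  have h1 : (if pvNorm N e.1 = (k : Int) ∧ 0 ≤ pvNorm N e.2 ∧ pvNorm N e.2 < (k : Int) then
      pvD ((pvAsnList edges N k).getD (pvNorm N e.2).toNat 9) else 0) =
      (if 0 ≤ pvNorm N e.2 ∧ pvNorm N e.2 < (k : Int) ∧ pvNorm N e.1 = (k : Int) then
      pvD (pvAsn edges N (pvNorm N e.2).toNat) else 0) := by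
    by_cases hc : pvNorm N e.1 = (k : Int) ∧ 0 ≤ pvNorm N e.2 ∧ pvNorm N e.2 < (k : Int)
    · rw [if_pos hc, if_pos ⟨hc.2.1, hc.2.2, hc.1⟩,
        pvAsnList_getD edges N (show (pvNorm N e.2).toNat < k by omega) 9]
    · rw [if_neg hc, if_neg (fun h => hc ⟨h.2.2, h.1, h.2.1⟩)]
  have h2 : (if pvNorm N e.2 = (k : Int) ∧ 0 ≤ pvNorm N e.1 ∧ pvNorm N e.1 < (k : Int) then
      pvD ((pvAsnList edges N k).getD (pvNorm N e.1).toNat 9) else 0) =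
      (if 0 ≤ pvNorm N e.1 ∧ pvNorm N e.1 < (k : Int) ∧ pvNorm N e.2 = (k : Int) then
      pvD (pvAsn edges N (pvNorm N e.1).toNat) else 0) := by
    by_cases hc : pvNorm N e.2 = (k : Int) ∧ 0 ≤ pvNorm N e.1 ∧ pvNorm N e.1 < (k : Int)
    · rw [if_pos hc, if_pos ⟨hc.2.1, hc.2.2, hc.1⟩,
        pvAsnList_getD edges N (show (pvNorm N e.1).toNat < k by omega) 9]
    · rw [if_neg hc, if_neg (fun h => hc ⟨h.2.2, h.1, h.2.1⟩)]
  rw [h1, h2]; ring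

theorem pvStep_eq_score (edges : List (Int × Int)) (N k : Nat) :
    pvStep edges N k (pvAsnList edges N k) = if 0 ≤ pvScore edges N k k then 1 else 0 := by
  rw [pvStep, pvScore]
  rw [List.map_congr_left (fun e _ => pv_edge_swap edges N k e)]

theorem pv_sum_flatMap {α β : Type} (g : α → List β) (h : β → Int) (l : List α) :
    ((l.flatMap g).map h).sum = (l.map (fun a => ((g a).map h).sum)).sum := by
  simp [List.flatMap_def, List.sum_flatten, Function.comp_def]

-- One push round from vertex k advances the score invariant.
theorem pvScore_succ (edges : List (Int × Int)) (N k m : Nat) :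
    pvScore edges N (k + 1) m =
      pvScore edges N k m +
        pvD (pvAsn edges N k) *
          (((pvAdjAt edges N k).map (fun j => if pvNorm N j = (m : Int) then (1 : Int) else 0)).sum) := by
  have hflat : ((pvAdjAt edges N k).map (fun j => if pvNorm N j = (m : Int) then (1 : Int) else 0)).sum =
      (edges.map (fun e =>
        (if pvNorm N e.1 = (k : Int) ∧ pvNorm N e.2 = (m : Int) then (1 : Int) else 0) +
        (if pvNorm N e.2 = (k : Int) ∧ pvNorm N e.1 = (m : Int) then (1 : Int) else 0))).sum := by
    rw [pvAdjAt, pv_sum_flatMap]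
    refine congrArg _ (List.map_congr_left fun e _ => ?_)
    split_ifs <;> simp_all
  rw [hflat, pvScore, pvScore, ← List.sum_map_mul_left, ← PySem.List.sum_map_add_int]
  refine congrArg _ (List.map_congr_left fun e _ => ?_)
  have hA : (if 0 ≤ pvNorm N e.1 ∧ pvNorm N e.1 < ((k : Int) + 1) ∧ pvNorm N e.2 = (m : Int) then
      pvD (pvAsn edges N (pvNorm N e.1).toNat) else 0) =
      (if 0 ≤ pvNorm N e.1 ∧ pvNorm N e.1 < (k : Int) ∧ pvNorm N e.2 = (m : Int) then
      pvD (pvAsn edges N (pvNorm N e.1).toNat) else 0) +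
      pvD (pvAsn edges N k) * (if pvNorm N e.1 = (k : Int) ∧ pvNorm N e.2 = (m : Int) then 1 else 0) := by
    by_cases h1 : pvNorm N e.1 = (k : Int)
    · by_cases hm : pvNorm N e.2 = (m : Int)
      · rw [if_pos ⟨by omega, by omega, hm⟩, if_neg (by omega), if_pos ⟨h1, hm⟩,
          show (pvNorm N e.1).toNat = k from by omega]
        ring
      · rw [if_neg (fun h => hm h.2.2), if_neg (fun h => hm h.2.2), if_neg (fun h => hm h.2)]
        ring
    · by_cases hc : 0 ≤ pvNorm N e.1 ∧ pvNorm N e.1 < (k : Int) ∧ pvNorm N e.2 = (m : Int)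
      · rw [if_pos ⟨hc.1, by omega, hc.2.2⟩, if_pos hc, if_neg (fun h => h1 h.1)]
        ring
      · rw [if_neg (by omega), if_neg hc, if_neg (fun h => h1 h.1)]
        ring
  have hB : (if 0 ≤ pvNorm N e.2 ∧ pvNorm N e.2 < ((k : Int) + 1) ∧ pvNorm N e.1 = (m : Int) then
      pvD (pvAsn edges N (pvNorm N e.2).toNat) else 0) =
      (if 0 ≤ pvNorm N e.2 ∧ pvNorm N e.2 < (k : Int) ∧ pvNorm N e.1 = (m : Int) then
      pvD (pvAsn edges N (pvNorm N e.2).toNat) else 0) +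
      pvD (pvAsn edges N k) * (if pvNorm N e.2 = (k : Int) ∧ pvNorm N e.1 = (m : Int) then 1 else 0) := by
    by_cases h1 : pvNorm N e.2 = (k : Int)
    · by_cases hm : pvNorm N e.1 = (m : Int)
      · rw [if_pos ⟨by omega, by omega, hm⟩, if_neg (by omega), if_pos ⟨h1, hm⟩,
          show (pvNorm N e.2).toNat = k from by omega]
        ring
      · rw [if_neg (fun h => hm h.2.2), if_neg (fun h => hm h.2.2), if_neg (fun h => hm h.2)]
        ring
    · by_cases hc : 0 ≤ pvNorm N e.2 ∧ pvNorm N e.2 < (k : Int) ∧ pvNorm N e.1 = (m : Int)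
      · rw [if_pos ⟨hc.1, by omega, hc.2.2⟩, if_pos hc, if_neg (fun h => h1 h.1)]
        ring
      · rw [if_neg (by omega), if_neg hc, if_neg (fun h => h1 h.1)]
        ring
  push_cast
  rw [hA, hB]
  ring

theorem pvPartial_getD (edges : List (Int × Int)) (N k : Nat) (z : Int)
    (t : Nat) (ht : t < N) (hk : k ≤ N) (d : Int) :
    (pvAsnList edges N k ++ List.replicate (N - k) z).getD t d =
      if t < k then pvAsn edges N t else z := by
  by_cases hj : t < k
  · rw [if_pos hj, List.getD_eq_getElem _ _ (by simp [pvAsnList_length]; omega),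
      List.getElem_append_left (by simp [pvAsnList_length]; omega),
      ← List.getD_eq_getElem _ d (by simp [pvAsnList_length]; omega),
      pvAsnList_getD edges N (by omega) d]
  · rw [if_neg hj, List.getD_eq_getElem _ _ (by simp [pvAsnList_length]; omega),
      List.getElem_append_right (by simp [pvAsnList_length]; omega)]
    simp

theorem pvFoldlIf {α : Type} (P : α → Prop) [DecidablePred P] : ∀ (l : List α) (a : Int),
    l.foldl (fun c j => if P j then c + 1 else c) a = a + (l.map (fun j => if P j then (1 : Int) else 0)).sum
  | [], a => by simp
  | x :: l, a => by
    rw [List.foldl_cons, pvFoldlIf P l]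
    by_cases h : P x <;> (simp [h]; try ring)

theorem pvPull_eq_step (edges : List (Int × Int)) (N k : Nat) (hkN : k < N)
    (hPre : ∀ e ∈ edges, -(N : Int) ≤ e.1 ∧ e.1 < (N : Int) ∧ -(N : Int) ≤ e.2 ∧ e.2 < (N : Int)) :
    (if (pvAdjAt edges N k).foldl
          (fun c j => if PySem.List.pyGetD (pvAsnList edges N k ++ List.replicate (N - k) (-1)) j 9 = 0 then c + 1 else c) (0 : Int) ≥
        (pvAdjAt edges N k).foldl
          (fun c j => if PySem.List.pyGetD (pvAsnList edges N k ++ List.replicate (N - k) (-1)) j 9 = 1 then c + 1 else c) (0 : Int)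
     then (1 : Int) else 0) = pvStep edges N k (pvAsnList edges N k) := by
  set asn := pvAsnList edges N k ++ List.replicate (N - k) (-1) with hasn
  have hlen : asn.length = N := by rw [hasn]; simp [pvAsnList_length]; omega
  rw [pvFoldlIf, pvFoldlIf, zero_add, zero_add]
  have hfun : ∀ j : Int, -(N : Int) ≤ j → j < (N : Int) →
      ((if PySem.List.pyGetD asn j 9 = 0 then (1 : Int) else 0) -
       (if PySem.List.pyGetD asn j 9 = 1 then (1 : Int) else 0)) =
      (if 0 ≤ pvNorm N j ∧ pvNorm N j < (k : Int) then pvD (pvAsn edges N (pvNorm N j).toNat) else 0) := by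
    intro j h0 h1
    have hb := pvNorm_bounds N j h0 h1
    rw [pvGetD_wrap asn j 9 (by omega) (by omega), hlen, hasn,
      pvPartial_getD edges N k (-1) (pvNorm N j).toNat (by omega) (by omega) 9]
    by_cases hj : (pvNorm N j).toNat < k
    · have hc : 0 ≤ pvNorm N j ∧ pvNorm N j < (k : Int) := ⟨hb.1, by omega⟩
      rw [if_pos hj, if_pos hc]
      rcases pvAsn_mem edges N (pvNorm N j).toNat with h | h <;> rw [h] <;> simp [pvD]
    · rw [if_neg hj]
      have : ¬ (0 ≤ pvNorm N j ∧ pvNorm N j < (k : Int)) := by omega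
      simp [this]
  have hsplit :
      ((pvAdjAt edges N k).map (fun j => if PySem.List.pyGetD asn j 9 = 0 then (1 : Int) else 0)).sum -
      ((pvAdjAt edges N k).map (fun j => if PySem.List.pyGetD asn j 9 = 1 then (1 : Int) else 0)).sum =
      ((pvAdjAt edges N k).map (fun j =>
        (if PySem.List.pyGetD asn j 9 = 0 then (1 : Int) else 0) -
        (if PySem.List.pyGetD asn j 9 = 1 then (1 : Int) else 0))).sum := by
    rw [show (fun j => (if PySem.List.pyGetD asn j 9 = 0 then (1 : Int) else 0) -
        (if PySem.List.pyGetD asn j 9 = 1 then (1 : Int) else 0)) = (fun j =>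
        (if PySem.List.pyGetD asn j 9 = 0 then (1 : Int) else 0) +
        (-(if PySem.List.pyGetD asn j 9 = 1 then (1 : Int) else 0))) from by funext j; ring,
      PySem.List.sum_map_add_int]
    rw [show (fun j => -(if PySem.List.pyGetD asn j 9 = 1 then (1 : Int) else 0)) =
        (Neg.neg ∘ fun j => (if PySem.List.pyGetD asn j 9 = 1 then (1 : Int) else 0)) from rfl,
      ← List.map_map]
    rw [← List.sum_neg]
    ring
  have hkey :
      ((pvAdjAt edges N k).map (fun j =>
        (if PySem.List.pyGetD asn j 9 = 0 then (1 : Int) else 0) -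
        (if PySem.List.pyGetD asn j 9 = 1 then (1 : Int) else 0))).sum =
      (edges.map (fun e =>
        (if pvNorm N e.1 = (k : Int) ∧ 0 ≤ pvNorm N e.2 ∧ pvNorm N e.2 < (k : Int) then
          pvD ((pvAsnList edges N k).getD (pvNorm N e.2).toNat 9) else 0) +
        (if pvNorm N e.2 = (k : Int) ∧ 0 ≤ pvNorm N e.1 ∧ pvNorm N e.1 < (k : Int) then
          pvD ((pvAsnList edges N k).getD (pvNorm N e.1).toNat 9) else 0))).sum := by
    rw [pvAdjAt, pv_sum_flatMap]
    refine congrArg _ (List.map_congr_left fun e he => ?_)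
    have hb := hPre e he
    have hb1 := pvNorm_bounds N e.1 hb.1 hb.2.1
    have hb2 := pvNorm_bounds N e.2 hb.2.2.1 hb.2.2.2
    rw [List.map_append, List.sum_append]
    congr 1
    · by_cases h1 : pvNorm N e.1 = (k : Int)
      · rw [if_pos h1]
        simp only [List.map_cons, List.map_nil, List.sum_cons, List.sum_nil, add_zero]
        rw [hfun e.2 hb.2.2.1 hb.2.2.2]
        by_cases h2 : pvNorm N e.2 < (k : Int)
        · rw [if_pos ⟨hb2.1, h2⟩, if_pos ⟨h1, hb2.1, h2⟩,
            pvAsnList_getD edges N (show (pvNorm N e.2).toNat < k by omega) 9]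
        · rw [if_neg (by omega), if_neg (by omega)]
      · rw [if_neg h1, if_neg (by omega)]
        simp
    · by_cases h1 : pvNorm N e.2 = (k : Int)
      · rw [if_pos h1]
        simp only [List.map_cons, List.map_nil, List.sum_cons, List.sum_nil, add_zero]
        rw [hfun e.1 hb.1 hb.2.1]
        by_cases h2 : pvNorm N e.1 < (k : Int)
        · rw [if_pos ⟨hb1.1, h2⟩, if_pos ⟨h1, hb1.1, h2⟩,
            pvAsnList_getD edges N (show (pvNorm N e.1).toNat < k by omega) 9]
        · rw [if_neg (by omega), if_neg (by omega)]
      · rw [if_neg h1, if_neg (by omega)]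
        simp
  rw [pvStep]
  split_ifs with hge hd hd
  · rfl
  · exfalso; apply hd; omega
  · exfalso; apply hge; omega
  · rfl

theorem pvSetPrefix (edges : List (Int × Int)) (N k : Nat) (hk : k < N) (z : Int) :
    (pvAsnList edges N k ++ List.replicate (N - k) z).set k (pvStep edges N k (pvAsnList edges N k)) =
      pvAsnList edges N (k + 1) ++ List.replicate (N - (k + 1)) z := by
  rw [List.set_append, if_neg (by simp [pvAsnList_length]), pvAsnList_length,
    Nat.sub_self, show N - k = (N - (k + 1)) + 1 from by omega, List.replicate_succ,
    List.set_cons_zero, pvAsnList_succ, List.append_assoc, List.singleton_append]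

theorem pvLoopA (edges : List (Int × Int)) (N : Nat) (adj : List (List Int))
    (hadj : ∀ m < N, adj.getD m [] = pvAdjAt edges N m)
    (hPre : ∀ e ∈ edges, -(N : Int) ≤ e.1 ∧ e.1 < (N : Int) ∧ -(N : Int) ≤ e.2 ∧ e.2 < (N : Int)) :
    ∀ k, k ≤ N →
    (List.range k).foldl (fun asn (i : Nat) =>
        PySem.List.pySetD asn (i : Int)
          (if (PySem.List.pyGetD adj (i : Int) []).foldl
                (fun c j => if PySem.List.pyGetD asn j 9 = 0 then c + 1 else c) (0 : Int) ≥
              (PySem.List.pyGetD adj (i : Int) []).foldl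
                (fun c j => if PySem.List.pyGetD asn j 9 = 1 then c + 1 else c) (0 : Int)
           then (1 : Int) else 0)) (List.replicate N (-1))
      = pvAsnList edges N k ++ List.replicate (N - k) (-1)
  | 0, _ => by simp [pvAsnList]
  | k + 1, hk => by
    rw [List.range_succ, List.foldl_append, pvLoopA edges N adj hadj hPre k (by omega),
      List.foldl_cons, List.foldl_nil]
    have hnb : PySem.List.pyGetD adj (k : Int) [] = pvAdjAt edges N k := by
      rw [PySem.List.pyGetD_natCast]; exact hadj k (by omega)
    rw [hnb, pvPull_eq_step edges N k (by omega) hPre, PySem.List.pySetD_natCast,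
      pvSetPrefix edges N k (by omega)]

theorem pvLoopB (edges : List (Int × Int)) (N : Nat) (adj : List (List Int))
    (hadj : ∀ m < N, adj.getD m [] = pvAdjAt edges N m)
    (hPre : ∀ e ∈ edges, -(N : Int) ≤ e.1 ∧ e.1 < (N : Int) ∧ -(N : Int) ≤ e.2 ∧ e.2 < (N : Int)) :
    ∀ k, k ≤ N →
    (List.range k).foldl (fun (st : List Int × List Int) (i : Nat) =>
        (PySem.List.pySetD st.1 (i : Int) (if 0 ≤ PySem.List.pyGetD st.2 (i : Int) 9 then (1 : Int) else 0),
         (PySem.List.pyGetD adj (i : Int) []).foldl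
           (fun sc j => PySem.List.pySetD sc j
             (PySem.List.pyGetD sc j 9 +
              (1 - 2 * (if 0 ≤ PySem.List.pyGetD st.2 (i : Int) 9 then (1 : Int) else 0)))) st.2))
      (List.replicate N 0, List.replicate N 0)
      = (pvAsnList edges N k ++ List.replicate (N - k) 0, (List.range N).map (fun j => pvScore edges N k j))
  | 0, _ => by
    simp only [List.range_zero, List.foldl_nil, pvAsnList, List.nil_append, Nat.sub_zero]
    have hz : ∀ j : Nat, pvScore edges N 0 j = 0 := by
      intro j
      rw [pvScore, List.map_congr_left (fun e _ => by rw [if_neg (by omega), if_neg (by omega)])]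
      simp
    rw [List.map_congr_left (fun j _ => hz j)]
    simp
  | k + 1, hk => by
    rw [List.range_succ, List.foldl_append, pvLoopB edges N adj hadj hPre k (by omega),
      List.foldl_cons, List.foldl_nil]
    have hsck : PySem.List.pyGetD ((List.range N).map (fun j => pvScore edges N k j)) (k : Int) 9 =
        pvScore edges N k k := by
      rw [PySem.List.pyGetD_natCast]; exact PySem.List.getD_map_range _ _ _ _ (by omega)
    have hs : (if 0 ≤ pvScore edges N k k then (1 : Int) else 0) = pvAsn edges N k := by
      rw [pvAsn_eq_step, pvStep_eq_score]
    simp only [hsck, hs]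
    have hnb : PySem.List.pyGetD adj (k : Int) [] = pvAdjAt edges N k := by
      rw [PySem.List.pyGetD_natCast]; exact hadj k (by omega)
    rw [hnb, PySem.List.pySetD_natCast]
    have hincr := incr_fold (1 - 2 * pvAsn edges N k) (pvAdjAt edges N k)
      ((List.range N).map (fun j => pvScore edges N k j))
      (by
        intro j hj
        have := pvAdjAt_bounds edges N k hPre j hj
        simpa using this)
    simp only [List.length_map, List.length_range] at hincr
    have hdelta1 : 1 - 2 * pvAsn edges N k = pvD (pvAsn edges N k) := by
      rcases pvAsn_mem edges N k with h | h <;> rw [h] <;> simp [pvD]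
    refine Prod.ext ?_ ?_
    · show (pvAsnList edges N k ++ List.replicate (N - k) 0).set k (pvAsn edges N k) =
        pvAsnList edges N (k + 1) ++ List.replicate (N - (k + 1)) 0
      rw [pvAsn_eq_step edges N k, pvSetPrefix edges N k (by omega)]
    · show (pvAdjAt edges N k).foldl
          (fun sc j => PySem.List.pySetD sc j (PySem.List.pyGetD sc j 9 + (1 - 2 * pvAsn edges N k)))
          ((List.range N).map fun j => pvScore edges N k j)
        = (List.range N).map fun j => pvScore edges N (k + 1) j
      refine List.ext_getElem (by rw [hincr.1]; simp) ?_
      intro m h1 h2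
      have hm : m < N := by simpa using h2
      rw [← List.getD_eq_getElem _ 9 h1,
          hincr.2 m hm,
          PySem.List.getD_map_range _ _ _ _ hm,
          List.getElem_map, List.getElem_range,
          hdelta1, pvScore_succ]

theorem pv_main (n : Int) (edges : List (Int × Int))
    (hpre : Pre_conditional_expectations_maxcut n edges) :
    conditional_expectations_maxcut n edges = conditional_expectations_maxcut_alt n edges := by
  have hPre : ∀ e ∈ edges, -((n.toNat : Nat) : Int) ≤ e.1 ∧ e.1 < ((n.toNat : Nat) : Int) ∧
      -((n.toNat : Nat) : Int) ≤ e.2 ∧ e.2 < ((n.toNat : Nat) : Int) := by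
    intro e he; have := hpre e he; omega
  simp only [conditional_expectations_maxcut, conditional_expectations_maxcut_alt, pvCutSize]
  rw [PySem.List.pyRange_one]
  simp only [List.foldl_map, zero_add, Int.sub_zero]
  rw [show (fun (adj : List (List Int)) (e : Int × Int) =>
      PySem.List.pySetD (PySem.List.pySetD adj e.1 (PySem.List.pyGetD adj e.1 [] ++ [e.2])) e.2
        (PySem.List.pyGetD (PySem.List.pySetD adj e.1 (PySem.List.pyGetD adj e.1 [] ++ [e.2])) e.2 [] ++ [e.1]))
      = pvStepA from rfl]
  have hadj := adj_build n.toNat edges (List.replicate n.toNat []) hPre (by simp)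
  rw [pvLoopA edges n.toNat (edges.foldl pvStepA (List.replicate n.toNat []))
      (fun m hm => by rw [hadj.2 m hm]; simp) hPre n.toNat le_rfl,
    pvLoopB edges n.toNat (edges.foldl pvStepA (List.replicate n.toNat []))
      (fun m hm => by rw [hadj.2 m hm]; simp) hPre n.toNat le_rfl]
  simp only [Nat.sub_self, List.replicate_zero, List.append_nil]

-- ===== VERDICT (by name: the statement is the Claim_ definition above) =====
theorem conditional_expectations_maxcut_spec : Claim_equal_conditional_expectations_maxcut := by
  intro n edges _ hpre
  exact pv_main n edges hpre
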